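-- pv_equiv track=rewrite | github.com/krzysztof-turowski/programming-contests | facebook-hacker-cup/2012-qualification-round/alphabet_soup.py | solve
-- ===== SOURCE A (Python) =====
-- import collections
--
-- def solve(S):
--     A = collections.defaultdict(int)
--     for s in S:
--         A[s] += 1
--     out = A['C'] // 2
--     for c in 'HAKERUP':
--         out = min(out, A[c])
--     return out
-- ===== SOURCE B (Python) =====
-- import collections
--
-- def solve(S):
--     need = collections.Counter("HACKERCUP")
--
--     def ok(k):
--         return all(S.count(c) >= k * need[c] for c in need)
--
--     lo, hi = 0, len(S) + 1  # ok(lo) holds, ok(hi) fails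
--     while hi - lo > 1:
--         mid = (lo + hi) // 2
--         if ok(mid):
--             lo = mid
--         else:
--             hi = mid
--     return lo
-- ===== Notes on version B (the rewrite author's own statement) =====
-- stated objective: alternative
-- what changed: B replaces A's count-then-min computation (dict of letter counts, floor-halving the doubly-needed letter, running min over the rest) by a binary search on the answer k over [0, len(S)+1), whose feasibility test checks that S contains at least k times every letter the target word requires; a timing run measured B faster (C-level str.count inside O(log n) feasibility tests vs A's Python-level per-character dict loop).
import Mathlib
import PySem

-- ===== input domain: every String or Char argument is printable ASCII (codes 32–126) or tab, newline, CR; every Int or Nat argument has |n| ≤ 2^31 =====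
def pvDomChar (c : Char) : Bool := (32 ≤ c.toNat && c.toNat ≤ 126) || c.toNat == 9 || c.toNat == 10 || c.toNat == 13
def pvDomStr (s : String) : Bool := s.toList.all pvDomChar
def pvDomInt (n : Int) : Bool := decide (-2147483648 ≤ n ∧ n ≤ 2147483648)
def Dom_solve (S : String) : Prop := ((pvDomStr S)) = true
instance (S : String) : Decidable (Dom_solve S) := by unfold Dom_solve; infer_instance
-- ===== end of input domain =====

-- B replaces A's count-then-min computation by a binary search on the answer k
-- (feasible(k): S holds k copies of each required letter); measured faster in a timing run.

-- ===== PORT A =====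
def solve (S : String) : Int :=
  let A : PySem.Dict Char Int := S.toList.foldl (fun d s => d.modify s 0 (· + 1)) PySem.Dict.empty
  let out := PySem.Int.floordiv (A.getD 'C' 0) 2
  "HAKERUP".toList.foldl (fun out c => min out (A.getD c 0)) out

-- ===== PORT B =====
-- the 'while hi - lo > 1' loop of Source B; fuel bounds the iteration count (the gap
-- hi - lo shrinks every iteration, so fuel = len(S) + 1 is always enough)
def bsLoop (ok : Int → Bool) : Nat → Int → Int → Int
  | 0, lo, _ => lo
  | fuel + 1, lo, hi =>
    if hi - lo > 1 then
      let mid := PySem.Int.floordiv (lo + hi) 2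
      if ok mid then bsLoop ok fuel mid hi else bsLoop ok fuel lo mid
    else lo

def solve_alt (S : String) : Int :=
  let need := PySem.Dict.counter "HACKERCUP".toList
  let ok : Int → Bool := fun k =>
    need.keys.all (fun c =>
      decide ((PySem.Str.count S (String.mk [c]) : Int) ≥ k * need.getD c 0))
  bsLoop ok (S.toList.length + 1) 0 (PySem.Str.len S + 1)

-- ===== PRECONDITION & SPEC =====
def Spec_solve (S : String) (out : Int) : Prop := out = solve_alt S
instance (S : String) (out : Int) : Decidable (Spec_solve S out) := by unfold Spec_solve; infer_instance

-- ===== CLAIM (what is proved, stated in full; the proofs are below) =====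
def Claim_equal_solve : Prop := ∀ (S : String), Dom_solve S → Spec_solve S (solve S)

-- ===== LEMMAS AND PROOFS =====

-- single-character substring count is character count
theorem go_single (c : Char) : ∀ (fuel : Nat) (s : List Char) (acc : Nat), s.length ≤ fuel →
    PySem.Chars.count.go [c] fuel s acc = acc + s.count c := by
  intro fuel
  induction fuel with
  | zero => intro s acc h; cases s with
    | nil => simp [PySem.Chars.count.go]
    | cons hd t => simp at h
  | succ n ih =>
    intro s acc h
    cases s with
    | nil => simp [PySem.Chars.count.go]
    | cons hd t =>
      rw [PySem.Chars.count.go]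
      by_cases hc : c = hd
      · subst hc
        simp only [List.isPrefixOf, beq_self_eq_true, Bool.and_true, if_true, List.length_cons,
          List.length_nil, List.count_cons_self]
        rw [show (0+1 : Nat) = 1 from rfl, List.drop_one, List.tail_cons]
        rw [ih t (acc+1) (by simp at h ⊢; omega)]
        omega
      · have hb : (c == hd) = false := by simp [hc]
        simp only [List.isPrefixOf, hb, Bool.false_and]
        rw [ih t acc (by simp at h ⊢; omega)]
        simp [List.count_cons]
        exact fun h' => hc h'.symm

theorem count_single (s : List Char) (c : Char) : PySem.Chars.count s [c] = s.count c := by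
  simp [PySem.Chars.count]; rw [go_single c s.length s 0 le_rfl]; omega

theorem str_count_single (S : String) (c : Char) :
    PySem.Str.count S (String.mk [c]) = S.toList.count c := by
  rw [PySem.Str.count_eq,
    show (String.mk [c]).toList = [c] from Eq.symm (String.ofList_eq.mp rfl)]
  exact count_single S.toList c

-- A's dict lookup is a character count
theorem dict_getD_count (S : String) (c : Char) :
    (S.toList.foldl (fun d s => d.modify s 0 (· + 1))
      (PySem.Dict.empty : PySem.Dict Char Int)).getD c 0 = (S.toList.count c : Int) := by
  rw [← PySem.Dict.counter_eq_foldl]; exact PySem.Dict.getD_counter _ _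

-- the value A computes, written over the eight character counts
def mval (S : String) : Int :=
  "HAKERUP".toList.foldl (fun out c => min out ((S.toList.count c : Int)))
    (PySem.Int.floordiv (S.toList.count 'C' : Int) 2)

theorem solve_eq_mval (S : String) : solve S = mval S := by
  unfold solve mval
  simp only [show ("HAKERUP".toList) = ['H','A','K','E','R','U','P'] from rfl,
    List.foldl, dict_getD_count]

-- B's feasibility test says exactly k ≤ mval S
theorem ok_iff (S : String) (k : Int) :
    ((PySem.Dict.counter "HACKERCUP".toList).keys.all (fun c =>
      decide ((PySem.Str.count S (String.mk [c]) : Int) ≥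
        k * (PySem.Dict.counter "HACKERCUP".toList).getD c 0)) = true) ↔ k ≤ mval S := by
  rw [show (PySem.Dict.counter "HACKERCUP".toList).keys
      = ['H','A','C','K','E','R','U','P'] from by decide]
  simp only [List.all_cons, List.all_nil, Bool.and_true, Bool.and_eq_true, decide_eq_true_eq,
    str_count_single, PySem.Dict.getD_counter, mval,
    show ("HAKERUP".toList) = ['H','A','K','E','R','U','P'] from rfl, List.foldl,
    show (List.count 'H' "HACKERCUP".toList) = 1 from rfl,
    show (List.count 'A' "HACKERCUP".toList) = 1 from rfl,
    show (List.count 'C' "HACKERCUP".toList) = 2 from rfl,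
    show (List.count 'K' "HACKERCUP".toList) = 1 from rfl,
    show (List.count 'E' "HACKERCUP".toList) = 1 from rfl,
    show (List.count 'R' "HACKERCUP".toList) = 1 from rfl,
    show (List.count 'U' "HACKERCUP".toList) = 1 from rfl,
    show (List.count 'P' "HACKERCUP".toList) = 1 from rfl]
  rw [show PySem.Int.floordiv ((S.toList.count 'C' : Nat) : Int) 2
      = (((S.toList.count 'C') / 2 : Nat) : Int) from
    PySem.Int.floordiv_natCast _ 2]
  constructor
  · rintro ⟨h1, h2, h3, h4, h5, h6, h7, h8⟩
    simp only [le_min_iff]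
    refine ⟨⟨⟨⟨⟨⟨⟨?_, ?_⟩, ?_⟩, ?_⟩, ?_⟩, ?_⟩, ?_⟩, ?_⟩ <;> omega
  · intro h
    simp only [le_min_iff] at h
    obtain ⟨⟨⟨⟨⟨⟨⟨q, hH⟩, hK⟩, hE⟩, hR⟩, hU⟩, hP⟩, hA⟩ := h
    refine ⟨by omega, by omega, by omega, by omega, by omega, by omega, by omega, by omega⟩

-- the binary-search loop finds mval S given a correct bracketing
theorem bsLoop_correct (S : String) (ok : Int → Bool)
    (hok : ∀ k, ok k = true ↔ k ≤ mval S) :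
    ∀ (fuel : Nat) (lo hi : Int), lo < hi → hi - lo ≤ (fuel : Int) →
      lo ≤ mval S → mval S < hi → bsLoop ok fuel lo hi = mval S := by
  intro fuel
  induction fuel with
  | zero => intro lo hi h1 h2 _ _; exfalso; omega
  | succ n ih =>
    intro lo hi h1 h2 hlo hhi
    rw [bsLoop]
    by_cases hgap : hi - lo > 1
    · simp only [hgap, if_true]
      have hmid := PySem.Int.floordiv_two_mid_bounds (le_of_lt h1)
      have hmid2 : lo < PySem.Int.floordiv (lo + hi) 2 ∧
          PySem.Int.floordiv (lo + hi) 2 < hi := by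
        constructor
        · rw [PySem.Int.floordiv_eq_ediv_of_pos (by omega)]; omega
        · rw [PySem.Int.floordiv_eq_ediv_of_pos (by omega)]; omega
      by_cases hok' : ok (PySem.Int.floordiv (lo + hi) 2) = true
      · simp only [hok', if_true]
        exact ih _ _ hmid2.2 (by omega) ((hok _).mp hok') hhi
      · have hf : ok (PySem.Int.floordiv (lo + hi) 2) = false := by
          simpa using hok'
        simp only [hf, Bool.false_eq_true, if_false]
        have hm : ¬ (PySem.Int.floordiv (lo + hi) 2 ≤ mval S) := fun h => by
          rw [(hok _).mpr h] at hf; simp at hf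
        exact ih _ _ hmid2.1 (by omega) hlo (by omega)
    · simp only [hgap, if_false]
      omega

theorem count_le_len (S : String) (c : Char) : S.toList.count c ≤ S.toList.length :=
  List.count_le_length

-- ===== VERDICT (by name: the statement is the Claim_ definition above) =====
theorem solve_spec : Claim_equal_solve := by
  intro S _
  unfold Spec_solve solve_alt
  rw [solve_eq_mval]
  have h0 : (0 : Int) ≤ mval S := by
    have := count_le_len S 'H'
    simp only [mval, show ("HAKERUP".toList) = ['H','A','K','E','R','U','P'] from rfl, List.foldl]
    rw [show PySem.Int.floordiv ((S.toList.count 'C' : Nat) : Int) 2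
        = (((S.toList.count 'C') / 2 : Nat) : Int) from PySem.Int.floordiv_natCast _ 2]
    simp only [le_min_iff]
    refine ⟨⟨⟨⟨⟨⟨⟨?_, ?_⟩, ?_⟩, ?_⟩, ?_⟩, ?_⟩, ?_⟩, ?_⟩ <;> positivity
  have hub : mval S < (PySem.Str.len S) + 1 := by
    have hH := count_le_len S 'H'
    have : mval S ≤ (S.toList.count 'H' : Int) := by
      simp only [mval, show ("HAKERUP".toList) = ['H','A','K','E','R','U','P'] from rfl,
        List.foldl]
      simp only [min_le_iff]
      omega
    rw [PySem.Str.len_eq]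
    omega
  exact (bsLoop_correct S _ (fun k => ok_iff S k) (S.toList.length + 1) 0
    ((PySem.Str.len S) + 1) (by rw [PySem.Str.len_eq]; positivity)
    (by rw [PySem.Str.len_eq]; push_cast; omega) h0 hub).symm
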